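-- pv_equiv track=rewrite | github.com/askrepps/advent-of-code-python | advent2020/day13.py | find_time_with_cosmic_bus_alignment
-- ===== SOURCE A (Python) =====
-- def find_time_with_cosmic_bus_alignment(buses):
--     max_bus = max(buses)
--     max_idx = buses.index(max_bus)
--     t = max_bus
--     searching = True
--     while searching:
--         searching = False
--         for idx, bus in enumerate(buses):
--             if bus > 0 and (t + (idx - max_idx)) % bus != 0:
--                 searching = True
--                 break
--         if searching:
--             t += max_bus
--     return t - max_idx
-- ===== SOURCE B (Python) =====
-- def find_time_with_cosmic_bus_alignment(buses):
--     max_bus = max(buses)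
--     max_idx = buses.index(max_bus)
--     # Sieve-style CRT: start at the first departure of the largest bus and
--     # merge in each remaining congruence, growing the step to the lcm of the
--     # periods handled so far.
--     t = max_bus
--     step = max_bus
--     for idx, bus in enumerate(buses):
--         if bus > 0:
--             target = (max_idx - idx) % bus
--             while t % bus != target:
--                 t += step
--             lcm = step
--             while lcm % bus != 0:
--                 lcm += step
--             step = lcm
--     return t - max_idx
-- ===== Notes on version B (the rewrite author's own statement) =====
-- stated objective: alternative
-- what changed: A scans t = max_bus, 2*max_bus, ... rechecking every bus each round until all align; B is a sieve-style CRT that starts at the first departure of the largest bus and merges each congruence once, growing the step to the lcm of the periods handled so far. Pre_ excludes the empty list (max([]) raises ValueError) and incompatible congruence systems, on which A's while-loop never terminates.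
-- outside the precondition, e.g. on find_time_with_cosmic_bus_alignment([]): A raises ValueError, B raises ValueError
import Mathlib
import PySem

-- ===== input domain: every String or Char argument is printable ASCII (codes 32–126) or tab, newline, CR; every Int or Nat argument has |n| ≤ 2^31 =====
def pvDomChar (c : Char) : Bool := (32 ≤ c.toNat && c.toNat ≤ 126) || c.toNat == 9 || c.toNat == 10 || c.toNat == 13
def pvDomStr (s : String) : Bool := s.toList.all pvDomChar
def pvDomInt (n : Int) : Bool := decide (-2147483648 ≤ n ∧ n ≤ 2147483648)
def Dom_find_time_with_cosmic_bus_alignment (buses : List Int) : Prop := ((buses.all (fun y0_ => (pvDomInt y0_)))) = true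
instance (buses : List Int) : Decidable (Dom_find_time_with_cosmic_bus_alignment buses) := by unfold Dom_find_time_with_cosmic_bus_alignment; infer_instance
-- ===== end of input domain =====

-- B replaces A's brute-force scan of multiples of the largest bus period by a sieve-style
-- CRT: seed at the largest bus's first departure, merge each congruence once with a step
-- growing to the lcm of the periods handled so far (objective: alternative).

-- lcm of the positive entries (used by port A as a termination fuel bound)
def pvLcmPos : List Int → Nat
  | [] => 1
  | b :: rest => if 0 < b then Nat.lcm b.toNat (pvLcmPos rest) else pvLcmPos rest

-- generic 'while ¬ p t: t += step' loop (fueled; under Pre_ the fuel always suffices)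
def pvLoop (step : Int) (p : Int → Bool) : Nat → Int → Int
  | 0, t => t
  | n + 1, t => if p t then t else pvLoop step p n (t + step)

-- ===== PORT A =====
-- the 'for idx, bus in enumerate(buses): if bus > 0 and … : searching = True; break' scan
def pvCheckA (buses : List Int) (maxIdx t : Int) : Bool :=
  (PySem.List.enumerate buses 0).any fun p =>
    decide (0 < p.2) && decide (PySem.Int.mod (t + (p.1 - maxIdx)) p.2 ≠ 0)

def find_time_with_cosmic_bus_alignment (buses : List Int) : Int :=
  -- max(buses) raises ValueError on []: Pre_ excludes the empty list
  let max_bus := (PySem.List.max? buses (fun y => y)).getD 0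
  let max_idx : Int := (((PySem.List.index? buses max_bus).getD 0 : Nat) : Int)
  -- 'while searching: …; t += max_bus' — fuel pvLcmPos buses + 1 suffices on Pre_ (proved below)
  let t := pvLoop max_bus (fun t => ! pvCheckA buses max_idx t) (pvLcmPos buses + 1) max_bus
  t - max_idx

-- ===== PORT B =====
-- body of B's 'for idx, bus in enumerate(buses)' loop: two 'while' advances, each fueled by bus
def pvStepB (maxIdx : Int) (ts : Int × Int) (p : Int × Int) : Int × Int :=
  if 0 < p.2 then
    let target := PySem.Int.mod (maxIdx - p.1) p.2
    let t := pvLoop ts.2 (fun t => decide (PySem.Int.mod t p.2 = target)) p.2.toNat ts.1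
    let m := pvLoop ts.2 (fun m => decide (PySem.Int.mod m p.2 = 0)) p.2.toNat ts.2
    (t, m)
  else ts

def find_time_with_cosmic_bus_alignment_alt (buses : List Int) : Int :=
  let max_bus := (PySem.List.max? buses (fun y => y)).getD 0
  let max_idx : Int := (((PySem.List.index? buses max_bus).getD 0 : Nat) : Int)
  let st := (PySem.List.enumerate buses 0).foldl (pvStepB max_idx) (max_bus, max_bus)
  st.1 - max_idx

-- ===== PRECONDITION & SPEC =====
-- Pre_ excludes the empty list (Python's max([]) raises ValueError) and incompatible bus
-- lists — two positive buses whose index difference is not divisible by their gcd — on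
-- which A's while-loop never terminates (by the CRT a common alignment time exists iff
-- every pair of constraints is compatible).
def Pre_find_time_with_cosmic_bus_alignment (buses : List Int) : Prop :=
  buses ≠ [] ∧ ∀ p ∈ PySem.List.enumerate buses 0, ∀ p' ∈ PySem.List.enumerate buses 0,
    0 < p.2 → 0 < p'.2 → ((Int.gcd p.2 p'.2 : Nat) : Int) ∣ (p.1 - p'.1)
instance (buses : List Int) : Decidable (Pre_find_time_with_cosmic_bus_alignment buses) := by
  unfold Pre_find_time_with_cosmic_bus_alignment; infer_instance

def pvWitness_find_time_with_cosmic_bus_alignment : List Int := [3, 4, 5]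

def Spec_find_time_with_cosmic_bus_alignment (buses : List Int) (out : Int) : Prop := out = find_time_with_cosmic_bus_alignment_alt buses
instance (buses : List Int) (out : Int) : Decidable (Spec_find_time_with_cosmic_bus_alignment buses out) := by unfold Spec_find_time_with_cosmic_bus_alignment; infer_instance

-- ===== CLAIM (what is proved, stated in full; the proofs are below) =====
def Claim_equal_find_time_with_cosmic_bus_alignment : Prop := ∀ (buses : List Int), Dom_find_time_with_cosmic_bus_alignment buses → Pre_find_time_with_cosmic_bus_alignment buses → Spec_find_time_with_cosmic_bus_alignment buses (find_time_with_cosmic_bus_alignment buses)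

-- ===== LEMMAS AND PROOFS =====

-- v is a common alignment time for all (index, bus) constraints
def pvSatAll (buses : List Int) (maxIdx v : Int) : Prop :=
  ∀ p ∈ PySem.List.enumerate buses 0, 0 < p.2 → p.2 ∣ (v + (p.1 - maxIdx))

-- invariant of B's fold (M = the largest bus, M > 0): t is the least solution ≥ M of the
-- processed constraints `done` along the seed progression, step their combined period
def pvInv (buses : List Int) (maxIdx M : Int) (done : List (Int × Int)) (t step : Int) : Prop :=
  0 < step ∧ M ≤ t ∧ t < M + step ∧ step ∣ (pvLcmPos buses : Int) ∧
  (∀ p ∈ done, 0 < p.2 → p.2 ∣ (t + (p.1 - maxIdx))) ∧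
  (∀ p ∈ done, 0 < p.2 → p.2 ∣ step) ∧
  (∀ v : Int, pvSatAll buses maxIdx v → step ∣ (v - t)) ∧
  (∀ b r : Int, 0 < b →
    (∀ p ∈ done, 0 < p.2 → ((Int.gcd p.2 b : Nat) : Int) ∣ (r - (maxIdx - p.1))) →
    ((Int.gcd step b : Nat) : Int) ∣ (r - t))

lemma pvLcmPos_pos (buses : List Int) : 0 < pvLcmPos buses := by
  induction buses with
  | nil => simp [pvLcmPos]
  | cons b rest ih =>
    simp only [pvLcmPos]
    split
    · exact Nat.pos_of_ne_zero (Nat.lcm_ne_zero (by omega) (by omega))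
    · exact ih

lemma dvd_pvLcmPos {buses : List Int} {b : Int} (hb : b ∈ buses) (hpos : 0 < b) :
    b ∣ (pvLcmPos buses : Int) := by
  induction buses with
  | nil => simp at hb
  | cons c rest ih =>
    rcases List.mem_cons.mp hb with h | h
    · subst h
      simp only [pvLcmPos, if_pos hpos]
      have : b.toNat ∣ Nat.lcm b.toNat (pvLcmPos rest) := Nat.dvd_lcm_left _ _
      have := Int.natCast_dvd_natCast.mpr this
      rwa [Int.toNat_of_nonneg (le_of_lt hpos)] at this
    · have hd := ih h
      simp only [pvLcmPos]
      split
      · exact hd.trans (Int.natCast_dvd_natCast.mpr (Nat.dvd_lcm_right _ _))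
      · exact hd

lemma pvNatGcdLcmDistrib (a b c : Nat) (ha : a ≠ 0) (hb : b ≠ 0) (hc : c ≠ 0) :
    Nat.gcd (Nat.lcm a b) c = Nat.lcm (Nat.gcd a c) (Nat.gcd b c) := by
  have hab : Nat.lcm a b ≠ 0 := Nat.lcm_ne_zero ha hb
  have hac : Nat.gcd a c ≠ 0 := Nat.gcd_ne_zero_left ha
  have hbc : Nat.gcd b c ≠ 0 := Nat.gcd_ne_zero_left hb
  apply Nat.eq_of_factorization_eq (Nat.gcd_ne_zero_left hab) (Nat.lcm_ne_zero hac hbc)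
  intro p
  rw [Nat.factorization_gcd hab hc, Nat.factorization_lcm hac hbc,
    Nat.factorization_lcm ha hb, Nat.factorization_gcd ha hc, Nat.factorization_gcd hb hc]
  simp [Finsupp.inf_apply, Finsupp.sup_apply]
  omega

lemma pvIntGcdLcmDistrib (a b c : Int) (ha : 0 < a) (hb : 0 < b) (hc : 0 < c) :
    Int.gcd ((Int.lcm a b : Nat) : Int) c = Nat.lcm (Int.gcd a c) (Int.gcd b c) := by
  exact pvNatGcdLcmDistrib a.natAbs b.natAbs c.natAbs
    (Int.natAbs_ne_zero.mpr (ne_of_gt ha)) (Int.natAbs_ne_zero.mpr (ne_of_gt hb))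
    (Int.natAbs_ne_zero.mpr (ne_of_gt hc))

lemma pvLoop_eq (step : Int) (p : Int → Bool) :
    ∀ (n₀ fuel : Nat) (t : Int), n₀ < fuel → p (t + n₀ * step) = true →
      (∀ k < n₀, p (t + k * step) = false) → pvLoop step p fuel t = t + n₀ * step := by
  intro n₀
  induction n₀ with
  | zero =>
    intro fuel t hf hp _
    match fuel, hf with
    | m + 1, _ =>
      simp only [pvLoop]
      simp only [Nat.cast_zero, zero_mul, add_zero] at hp ⊢
      rw [hp]
      simp
  | succ n ih =>
    intro fuel t hf hp hmin
    match fuel, hf with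
    | m + 1, hf =>
      simp only [pvLoop]
      have h0 : p t = false := by simpa using hmin 0 (Nat.succ_pos n)
      rw [h0]
      simp only [Bool.false_eq_true, if_false]
      have heq : ∀ k : Nat, t + step + (k : Int) * step = t + ((k + 1 : Nat) : Int) * step := by
        intro k; push_cast; ring
      rw [show t + ((n + 1 : Nat) : Int) * step = t + step + (n : Int) * step by push_cast; ring]
      apply ih m (t + step) (by omega)
      · rw [heq n]; exact hp
      · intro k hk
        rw [heq k]
        exact hmin (k + 1) (by omega)

-- the heavy step: pvStepB preserves the invariant
lemma pvStepB_inv (buses : List Int) (maxIdx M : Int)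
    (hpair : ∀ p ∈ PySem.List.enumerate buses 0, ∀ p' ∈ PySem.List.enumerate buses 0,
      0 < p.2 → 0 < p'.2 → ((Int.gcd p.2 p'.2 : Nat) : Int) ∣ (p.1 - p'.1)) (q : Int × Int)
    (hq : q ∈ PySem.List.enumerate buses 0) (done : List (Int × Int))
    (hdone : ∀ p ∈ done, p ∈ PySem.List.enumerate buses 0) (t step : Int)
    (hInv : pvInv buses maxIdx M done t step) :
    pvInv buses maxIdx M (done ++ [q]) (pvStepB maxIdx (t, step) q).1 (pvStepB maxIdx (t, step) q).2 := by
  obtain ⟨hstep, htM, htlt, hstepL, hsat, hdvd, hmin, hfield⟩ := hInv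
  by_cases hb : 0 < q.2
  · -- positive bus: the two fueled while-advances
    have hbt : ((q.2.toNat : Nat) : Int) = q.2 := Int.toNat_of_nonneg hb.le
    have hbt1 : 1 ≤ q.2.toNat := by omega
    -- membership of the bus value in buses
    have hbmem : q.2 ∈ buses := by
      obtain ⟨k, hk, hpk⟩ := (PySem.List.mem_enumerate_iff _ _ _).mp hq
      rw [hpk]; exact List.getElem_mem hk
    have hbL : q.2 ∣ (pvLcmPos buses : Int) := dvd_pvLcmPos hbmem hb
    -- the t-advance: a hit of the target residue exists, by Bezout from the invariant
    -- compatibility field and the pairwise compatibility of the new constraint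
    have hexT : ∃ k : Nat, PySem.Int.mod (t + (k : Int) * step) q.2 = PySem.Int.mod (maxIdx - q.1) q.2 := by
      have hgd : ((Int.gcd step q.2 : Nat) : Int) ∣ ((maxIdx - q.1) - t) := by
        apply hfield q.2 (maxIdx - q.1) hb
        intro p hp hpos
        have h5 := hpair p (hdone p hp) q hq hpos hb
        rwa [show p.1 - q.1 = (maxIdx - q.1) - (maxIdx - p.1) by ring] at h5
      obtain ⟨m, hm⟩ := hgd
      have hbez := Int.gcd_eq_gcd_ab step q.2
      set x := Int.gcdA step q.2 with hx
      set y := Int.gcdB step q.2 with hy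
      set k' := (x * m) % q.2 with hk'
      have hk'0 : 0 ≤ k' := Int.emod_nonneg _ (ne_of_gt hb)
      refine ⟨k'.toNat, ?_⟩
      rw [PySem.Int.mod_eq_emod_of_pos hb, PySem.Int.mod_eq_emod_of_pos hb,
        Int.emod_eq_emod_iff_emod_sub_eq_zero]
      apply Int.emod_eq_zero_of_dvd
      rw [Int.toNat_of_nonneg hk'0]
      have hdm : q.2 * (x * m / q.2) + x * m % q.2 = x * m := Int.ediv_add_emod _ _
      have hid : t + k' * step - (maxIdx - q.1)
          = q.2 * (-(y * m) - (x * m / q.2) * step) := by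
        rw [hk']
        linear_combination (-1 : Int) * hm + (-m) * hbez + step * hdm
      rw [hid]
      exact dvd_mul_right _ _
    set k₀ := Nat.find hexT with hk₀def
    have hk₀ := Nat.find_spec hexT
    have hk₀lt : k₀ < q.2.toNat := by
      by_contra hge
      push_neg at hge
      have hhit : PySem.Int.mod (t + ((k₀ - q.2.toNat : Nat) : Int) * step) q.2
          = PySem.Int.mod (maxIdx - q.1) q.2 := by
        rw [PySem.Int.mod_eq_emod_of_pos hb] at hk₀ ⊢
        rw [show t + ((k₀ - q.2.toNat : Nat) : Int) * step = t + (k₀ : Int) * step + q.2 * (-step) by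
          push_cast [hge]; rw [hbt]; ring]
        rw [Int.add_mul_emod_self_left]
        exact hk₀
      exact absurd hhit (Nat.find_min hexT (by omega))
    have ht' : pvLoop step (fun t_ => decide (PySem.Int.mod t_ q.2 = PySem.Int.mod (maxIdx - q.1) q.2)) q.2.toNat t
        = t + (k₀ : Int) * step := by
      apply pvLoop_eq step _ k₀ q.2.toNat t hk₀lt
      · simp only [decide_eq_true_eq]; exact hk₀
      · intro k hk
        simp only [decide_eq_false_iff_not]
        exact Nat.find_min hexT hk
    -- the m-advance: first multiple of step divisible by the bus; it is lcm(step, bus)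
    have HitMb : PySem.Int.mod (step + ((q.2.toNat - 1 : Nat) : Int) * step) q.2 = 0 := by
      rw [PySem.Int.mod_eq_emod_of_pos hb]
      rw [show step + ((q.2.toNat - 1 : Nat) : Int) * step = q.2 * step by push_cast [hbt1]; rw [hbt]; ring]
      exact Int.mul_emod_right _ _
    have hexM : ∃ j : Nat, PySem.Int.mod (step + (j : Int) * step) q.2 = 0 := ⟨q.2.toNat - 1, HitMb⟩
    set j₀ := Nat.find hexM with hj₀def
    have hj₀ := Nat.find_spec hexM
    have hj₀lt : j₀ < q.2.toNat := by
      have := Nat.find_min' hexM HitMb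
      omega
    have hm' : pvLoop step (fun m_ => decide (PySem.Int.mod m_ q.2 = 0)) q.2.toNat step
        = step + (j₀ : Int) * step := by
      apply pvLoop_eq step _ j₀ q.2.toNat step hj₀lt
      · simp only [decide_eq_true_eq]; exact hj₀
      · intro k hk
        simp only [decide_eq_false_iff_not]
        exact Nat.find_min hexM hk
    set t' := t + (k₀ : Int) * step with ht'def
    set m' := step + (j₀ : Int) * step with hm'def
    have hm'step : step ∣ m' := ⟨1 + (j₀ : Int), by ring⟩
    have hm'b : q.2 ∣ m' := by
      rw [PySem.Int.mod_eq_emod_of_pos hb] at hj₀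
      exact Int.dvd_of_emod_eq_zero hj₀
    have hm'pos : 0 < m' := by nlinarith [Int.natCast_nonneg j₀]
    have hl_dvd : ((Int.lcm step q.2 : Nat) : Int) ∣ m' := Int.coe_lcm_dvd hm'step hm'b
    have hm'l : m' = ((Int.lcm step q.2 : Nat) : Int) := by
      obtain ⟨d, hd⟩ := Int.dvd_lcm_left step q.2
      have hlpos : 0 < ((Int.lcm step q.2 : Nat) : Int) := by
        rcases hl_dvd with ⟨e, he⟩
        by_contra hle
        push_neg at hle
        have : ((Int.lcm step q.2 : Nat) : Int) = 0 := le_antisymm hle (Int.natCast_nonneg _)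
        rw [this] at he; simp at he; omega
      have hd1 : 1 ≤ d := by nlinarith
      have hhd : PySem.Int.mod (step + ((d - 1).toNat : Int) * step) q.2 = 0 := by
        rw [PySem.Int.mod_eq_emod_of_pos hb]
        rw [show step + ((d - 1).toNat : Int) * step = step * d by
          rw [Int.toNat_of_nonneg (by omega)]; ring]
        rw [← hd]
        exact Int.emod_eq_zero_of_dvd (Int.dvd_lcm_right step q.2)
      have hj₀le : j₀ ≤ (d - 1).toNat := Nat.find_min' hexM hhd
      have hj₀le' : (j₀ : Int) ≤ d - 1 := by
        have := Int.toNat_of_nonneg (show (0:Int) ≤ d - 1 by omega)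
        omega
      have hle : m' ≤ ((Int.lcm step q.2 : Nat) : Int) := by
        rw [hm'def, hd]; nlinarith
      exact le_antisymm hle (Int.le_of_dvd hm'pos hl_dvd)
    have hcm : ∀ v : Int, step ∣ v → q.2 ∣ v → m' ∣ v := by
      intro v h1 h2; rw [hm'l]; exact Int.coe_lcm_dvd h1 h2
    -- t' is congruent to the target mod q.2
    have ht'b : q.2 ∣ (t' + (q.1 - maxIdx)) := by
      rw [PySem.Int.mod_eq_emod_of_pos hb, PySem.Int.mod_eq_emod_of_pos hb] at hk₀
      rw [Int.emod_eq_emod_iff_emod_sub_eq_zero] at hk₀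
      have := Int.dvd_of_emod_eq_zero hk₀
      rwa [show t + (k₀ : Int) * step - (maxIdx - q.1) = (t + (k₀ : Int) * step) + (q.1 - maxIdx) by ring] at this
    -- assemble the invariant
    have hgoal : pvInv buses maxIdx M (done ++ [q]) t' m' := by
      refine ⟨hm'pos, by
        have := mul_nonneg (Int.natCast_nonneg k₀) hstep.le
        rw [ht'def]; linarith, ?_, ?_, ?_, ?_, ?_, ?_⟩
      · -- t' < M + m'
        by_contra hge
        push_neg at hge
        have hst'' : step ∣ (t' - m' - t) := by
          have h1 : step ∣ (t' - t) := ⟨(k₀ : Int), by rw [ht'def]; ring⟩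
          have := dvd_sub h1 hm'step
          rwa [show t' - t - m' = t' - m' - t by ring] at this
        have htt'' : t ≤ t' - m' := by
          by_contra hlt2
          push_neg at hlt2
          have h2 : step ∣ (t - (t' - m')) := by
            have := dvd_neg.mpr hst''
            rwa [neg_sub] at this
          have := Int.le_of_dvd (by omega) h2
          omega
        obtain ⟨e, he⟩ := hst''
        have he0 : 0 ≤ e := by nlinarith
        have helt : e < (k₀ : Int) := by nlinarith
        have hhit'' : PySem.Int.mod (t + (e.toNat : Int) * step) q.2 = PySem.Int.mod (maxIdx - q.1) q.2 := by
          rw [Int.toNat_of_nonneg he0]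
          rw [PySem.Int.mod_eq_emod_of_pos hb, PySem.Int.mod_eq_emod_of_pos hb]
          rw [PySem.Int.mod_eq_emod_of_pos hb, PySem.Int.mod_eq_emod_of_pos hb] at hk₀
          rw [Int.emod_eq_emod_iff_emod_sub_eq_zero] at hk₀ ⊢
          apply Int.emod_eq_zero_of_dvd
          have h3 : t + e * step = t' - m' := by linarith [he, mul_comm e step]
          have h4 : q.2 ∣ (t' - (maxIdx - q.1)) := Int.dvd_of_emod_eq_zero hk₀
          rw [h3]
          have : t' - m' - (maxIdx - q.1) = (t' - (maxIdx - q.1)) - m' := by ring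
          rw [this]
          exact dvd_sub h4 hm'b
        have : e.toNat < k₀ := by omega
        exact absurd hhit'' (Nat.find_min hexT this)
      · exact hcm _ hstepL hbL
      · -- all processed constraints hold at t'
        intro p hp hpos
        rcases List.mem_append.mp hp with h | h
        · have h1 := hsat p h hpos
          have h2 : p.2 ∣ (t' - t) := (hdvd p h hpos).trans ⟨(k₀ : Int), by rw [ht'def]; ring⟩
          have := dvd_add h1 h2
          rwa [show t + (p.1 - maxIdx) + (t' - t) = t' + (p.1 - maxIdx) by ring] at this
        · simp only [List.mem_singleton] at h
          subst h
          exact ht'b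
      · -- all processed buses divide m'
        intro p hp hpos
        rcases List.mem_append.mp hp with h | h
        · exact (hdvd p h hpos).trans hm'step
        · simp only [List.mem_singleton] at h
          subst h
          exact hm'b
      · -- every common time is congruent to t' mod m'
        intro v hv
        have h1 : step ∣ (v - t) := hmin v hv
        have h2 : step ∣ (v - t') := by
          have h3 : step ∣ (t' - t) := ⟨(k₀ : Int), by rw [ht'def]; ring⟩
          have := dvd_sub h1 h3
          rwa [show v - t - (t' - t) = v - t' by ring] at this
        have h4 : q.2 ∣ (v - t') := by
          have h5 := hv q hq hb
          have := dvd_sub h5 ht'b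
          rwa [show v + (q.1 - maxIdx) - (t' + (q.1 - maxIdx)) = v - t' by ring] at this
        exact hcm _ h2 h4
      · -- the compatibility field is preserved: gcd(lcm(step,bus),b) distributes
        intro b r hbpos hcompat
        have h1 : ((Int.gcd step b : Nat) : Int) ∣ (r - t') := by
          have h1a := hfield b r hbpos (fun p hp hpos => hcompat p (List.mem_append_left _ hp) hpos)
          have h1b : ((Int.gcd step b : Nat) : Int) ∣ (t' - t) :=
            (Int.gcd_dvd_left step b).trans ⟨(k₀ : Int), by rw [ht'def]; ring⟩
          have := dvd_sub h1a h1b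
          rwa [show r - t - (t' - t) = r - t' by ring] at this
        have h2 : ((Int.gcd q.2 b : Nat) : Int) ∣ (r - t') := by
          have h2a := hcompat q (List.mem_append_right _ (List.mem_singleton_self q)) hb
          have h2b : ((Int.gcd q.2 b : Nat) : Int) ∣ (t' - (maxIdx - q.1)) := by
            apply (Int.gcd_dvd_left q.2 b).trans
            have := ht'b
            rwa [show t' + (q.1 - maxIdx) = t' - (maxIdx - q.1) by ring] at this
          have := dvd_sub h2a h2b
          rwa [show r - (maxIdx - q.1) - (t' - (maxIdx - q.1)) = r - t' by ring] at this
        have hdist : Int.gcd m' b = Nat.lcm (Int.gcd step b) (Int.gcd q.2 b) := by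
          rw [hm'l]; exact pvIntGcdLcmDistrib step q.2 b hstep hb hbpos
        rw [hdist]
        have hlcm : ((Nat.lcm (Int.gcd step b) (Int.gcd q.2 b) : Nat) : Int)
            = ((Int.lcm ((Int.gcd step b : Nat) : Int) ((Int.gcd q.2 b : Nat) : Int) : Nat) : Int) := by
          rw [Int.lcm]
          simp [Int.natAbs_natCast]
        rw [hlcm]
        exact Int.coe_lcm_dvd h1 h2
    simp only [pvStepB, if_pos hb, ht', hm']
    exact hgoal
  · -- nonpositive bus: the state is unchanged and the new constraint is vacuous
    simp only [pvStepB, if_neg hb]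
    refine ⟨hstep, htM, htlt, hstepL, ?_, ?_, hmin, ?_⟩
    · intro p hp hpos
      rcases List.mem_append.mp hp with h | h
      · exact hsat p h hpos
      · simp only [List.mem_singleton] at h; subst h; omega
    · intro p hp hpos
      rcases List.mem_append.mp hp with h | h
      · exact hdvd p h hpos
      · simp only [List.mem_singleton] at h; subst h; omega
    · intro b r hbpos hcompat
      exact hfield b r hbpos (fun p hp hpos => hcompat p (List.mem_append_left _ hp) hpos)

lemma pvFoldB_inv (buses : List Int) (maxIdx M : Int)
    (hpair : ∀ p ∈ PySem.List.enumerate buses 0, ∀ p' ∈ PySem.List.enumerate buses 0,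
      0 < p.2 → 0 < p'.2 → ((Int.gcd p.2 p'.2 : Nat) : Int) ∣ (p.1 - p'.1)) :
    ∀ (rest done : List (Int × Int)) (t step : Int),
      (∀ p ∈ rest, p ∈ PySem.List.enumerate buses 0) →
      (∀ p ∈ done, p ∈ PySem.List.enumerate buses 0) →
      pvInv buses maxIdx M done t step →
      pvInv buses maxIdx M (done ++ rest)
        (List.foldl (pvStepB maxIdx) (t, step) rest).1
        (List.foldl (pvStepB maxIdx) (t, step) rest).2 := by
  intro rest
  induction rest with
  | nil => intro done t step _ _ h; simpa using h
  | cons q rest ih =>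
    intro done t step hrest hdone hInv
    have hq : q ∈ PySem.List.enumerate buses 0 := hrest q (by simp)
    have h1 := pvStepB_inv buses maxIdx M hpair q hq done hdone t step hInv
    have h2 := ih (done ++ [q]) (pvStepB maxIdx (t, step) q).1 (pvStepB maxIdx (t, step) q).2
      (fun p hp => hrest p (by simp [hp]))
      (by intro p hp; rcases List.mem_append.mp hp with h | h
          · exact hdone p h
          · simp only [List.mem_singleton] at h; subst h; exact hq) h1
    simpa [List.foldl_cons] using h2

-- with no positive bus the fold is the identity on the state
lemma pvFoldB_id (maxIdx : Int) :
    ∀ (l : List (Int × Int)) (ts : Int × Int), (∀ p ∈ l, p.2 ≤ 0) →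
      List.foldl (pvStepB maxIdx) ts l = ts := by
  intro l
  induction l with
  | nil => intro ts _; rfl
  | cons q rest ih =>
    intro ts hl
    have hq : ¬ 0 < q.2 := by have := hl q (by simp); omega
    simp only [List.foldl_cons, pvStepB, if_neg hq]
    exact ih ts (fun p hp => hl p (by simp [hp]))

lemma pvCheckA_false_iff (buses : List Int) (maxIdx t : Int) :
    pvCheckA buses maxIdx t = false ↔ pvSatAll buses maxIdx t := by
  simp only [pvCheckA, List.any_eq_false, pvSatAll, Bool.and_eq_true, decide_eq_true_eq]
  constructor
  · intro h p hp hpos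
    have h' := h p hp
    rw [not_and] at h'
    have := h' hpos
    push_neg at this
    exact (PySem.Int.mod_eq_zero_iff_dvd _ _).mp this
  · intro h p hp
    rw [not_and]
    intro hpos
    have := (PySem.Int.mod_eq_zero_iff_dvd (t + (p.1 - maxIdx)) p.2).mpr (h p hp hpos)
    simp [this]

-- ===== VERDICT (by name: the statement is the Claim_ definition above) =====
theorem find_time_with_cosmic_bus_alignment_spec : Claim_equal_find_time_with_cosmic_bus_alignment := by
  intro buses hdom hpre
  unfold Spec_find_time_with_cosmic_bus_alignment
  obtain ⟨hne, hpair⟩ := hpre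
  rcases hM : PySem.List.max? buses (fun y => y) with _ | M
  · exact absurd ((PySem.List.max?_eq_none_iff _ _).mp hM) hne
  have hMmem := PySem.List.max?_mem hM
  have hMmax := PySem.List.max?_isMax hM
  rcases hI : PySem.List.index? buses M with _ | iN
  · exact absurd hMmem ((PySem.List.index?_eq_none_iff _ _).mp hI)
  obtain ⟨hiN, hgetM, hfirst⟩ := PySem.List.getElem_of_index?_eq_some hI
  unfold find_time_with_cosmic_bus_alignment find_time_with_cosmic_bus_alignment_alt
  simp only [hM, hI, Option.getD_some]
  set maxIdx : Int := ((iN : Nat) : Int) with hmidef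
  have hqM : (((iN : Nat) : Int), M) ∈ PySem.List.enumerate buses 0 := by
    rw [PySem.List.mem_enumerate_iff]
    exact ⟨iN, hiN, by simp [hgetM]⟩
  by_cases hMpos : 0 < M
  case neg =>
    push_neg at hMpos
    -- no positive bus: A's check passes at t = M and B's fold changes nothing
    have hall : ∀ p ∈ PySem.List.enumerate buses 0, p.2 ≤ 0 := by
      intro p hp
      obtain ⟨k, hk, hpk⟩ := (PySem.List.mem_enumerate_iff _ _ _).mp hp
      have hle := hMmax _ (List.getElem_mem hk)
      rw [hpk]
      simpa using le_trans hle hMpos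
    have hcheck : pvCheckA buses maxIdx M = false := by
      rw [pvCheckA_false_iff]
      intro p hp hpos
      exact absurd (hall p hp) (by omega)
    have happ := pvLoop_eq M (fun t => ! pvCheckA buses maxIdx t) 0 (pvLcmPos buses + 1) M
      (by omega) (by simp [hcheck]) (by omega)
    simp only [Nat.cast_zero, zero_mul, add_zero] at happ
    rw [happ, pvFoldB_id maxIdx _ _ hall]
  case pos =>
    -- seed invariant: done = the max-bus constraint, t = step = M
    have hML : M ∣ (pvLcmPos buses : Int) := dvd_pvLcmPos hMmem hMpos
    have hInv0 : pvInv buses maxIdx M [(maxIdx, M)] M M := by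
      refine ⟨hMpos, le_refl M, by omega, hML, ?_, ?_, ?_, ?_⟩
      · intro p hp hpos
        simp only [List.mem_singleton] at hp
        subst hp
        simpa using ⟨1, by ring⟩
      · intro p hp _
        simp only [List.mem_singleton] at hp
        subst hp
        exact dvd_refl M
      · intro v hv
        have := hv _ hqM hMpos
        simp only [hmidef, sub_self, add_zero] at this
        exact dvd_sub this ⟨1, by ring⟩
      · intro b r _ hcompat
        have h1 := hcompat (maxIdx, M) (by simp) hMpos
        simp only [sub_self] at h1
        have h2 : ((Int.gcd M b : Nat) : Int) ∣ M := Int.gcd_dvd_left M b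
        simpa using dvd_sub h1 h2
    have hfold := pvFoldB_inv buses maxIdx M hpair (PySem.List.enumerate buses 0)
      [(maxIdx, M)] M M (fun p hp => hp) (by intro p hp; simp only [List.mem_singleton] at hp; subst hp; exact hqM) hInv0
    set st := (PySem.List.enumerate buses 0).foldl (pvStepB maxIdx) (M, M) with hstdef
    obtain ⟨hs_pos, ht_M, ht_lt, hs_L, hsatf, _, hminf, _⟩ := hfold
    have hTsol : pvSatAll buses maxIdx st.1 := fun p hp hpos =>
      hsatf p (List.mem_append_right _ hp) hpos
    have hMT : M ∣ st.1 := by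
      have := hTsol _ hqM hMpos
      rw [hmidef] at this
      simpa using this
    have hLpos := pvLcmPos_pos buses
    have hLpos' : (0 : Int) < (pvLcmPos buses : Int) := by exact_mod_cast hLpos
    have hsfL : st.2 ≤ (pvLcmPos buses : Int) := Int.le_of_dvd hLpos' hs_L
    obtain ⟨d, hd⟩ := hMT
    have hd1 : 1 ≤ d := by nlinarith
    set n₀ := (d - 1).toNat with hn₀def
    have hdn₀ : ((n₀ : Nat) : Int) = d - 1 := Int.toNat_of_nonneg (by omega)
    have hTn0 : st.1 = M + (n₀ : Int) * M := by rw [hdn₀, hd]; ring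
    have hfuel : n₀ < pvLcmPos buses + 1 := by
      have h1 : (n₀ : Int) * M < (pvLcmPos buses : Int) := by
        have := ht_lt
        rw [hTn0] at this
        omega
      have h2 : (n₀ : Int) ≤ (n₀ : Int) * M := le_mul_of_one_le_right (Int.natCast_nonneg _) hMpos
      have : (n₀ : Int) < (pvLcmPos buses : Int) := lt_of_le_of_lt h2 h1
      omega
    have happ := pvLoop_eq M (fun t => ! pvCheckA buses maxIdx t) n₀ (pvLcmPos buses + 1) M hfuel
      (by
        rw [← hTn0]
        simp only [Bool.not_eq_eq_eq_not, Bool.not_true]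
        rw [pvCheckA_false_iff]
        exact hTsol)
      (by
        intro k hk
        set v : Int := M + (k : Int) * M with hvdef
        show (! pvCheckA buses maxIdx v) = false
        cases hchk : pvCheckA buses maxIdx v with
        | true => simp
        | false =>
          exfalso
          have hSv := (pvCheckA_false_iff buses maxIdx v).mp hchk
          have hdv := hminf v hSv
          have hvM : M ≤ v := by nlinarith [Int.natCast_nonneg k]
          -- v ≥ st.1 since v ≡ st.1 (mod st.2) and v ≥ M > st.1 - st.2
          have hvT : st.1 ≤ v := by
            by_contra hlt2
            push_neg at hlt2
            have h1 : st.2 ∣ (st.1 - v) := by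
              have := dvd_neg.mpr hdv
              rwa [neg_sub] at this
            have h2 : st.2 ≤ st.1 - v := Int.le_of_dvd (by omega) h1
            omega
          have hkn : (k : Int) < (n₀ : Int) := by exact_mod_cast hk
          rw [hTn0] at hvT
          nlinarith)
    rw [happ, ← hTn0]
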